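-- pv_equiv track=rewrite | github.com/AlexxxKo/Python_Seminars | Lesson03/Task05.py | negafib_fib
-- ===== SOURCE A (Python) =====
-- def negafib_fib(num):
--     list = []
--     a, b = 1, 1
--     for i in range(num-1):
--         list.append(a)
--         a, b = b, a + b
--     a, b = 0, 1
--     for i in range(num):
--         list.insert(0, a)
--         a, b = b, a - b
--     return list
-- ===== SOURCE B (Python) =====
-- def negafib_fib(num):
--     fib = []
--     a, b = 0, 1
--     for _ in range(num):
--         fib.append(a)
--         a, b = b, a + b
--     neg = [f if k % 2 == 1 else -f for k, f in enumerate(fib)]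
--     neg.reverse()
--     return neg + fib[1:]
-- ===== Notes on version B (the rewrite author's own statement) =====
-- stated objective: simpler
-- what changed: B builds only the forward Fibonacci table once and derives the negafibonacci prefix by flipping the sign of every even-index entry and reversing, instead of A's second backward recurrence loop that repeatedly inserts at position 0.
import Mathlib
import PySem

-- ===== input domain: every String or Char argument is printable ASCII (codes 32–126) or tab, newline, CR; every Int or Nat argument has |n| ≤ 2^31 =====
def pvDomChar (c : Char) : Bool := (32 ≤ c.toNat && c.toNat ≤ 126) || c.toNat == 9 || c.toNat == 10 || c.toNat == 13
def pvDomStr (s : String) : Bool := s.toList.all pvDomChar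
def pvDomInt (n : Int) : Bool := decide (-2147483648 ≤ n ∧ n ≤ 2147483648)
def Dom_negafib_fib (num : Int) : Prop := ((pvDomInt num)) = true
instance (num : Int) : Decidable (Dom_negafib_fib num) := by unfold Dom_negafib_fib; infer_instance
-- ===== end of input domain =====

-- B builds the forward Fibonacci table once and obtains the negafibonacci prefix by flipping the sign
-- of every even-index entry and reversing, replacing A's second backward-recurrence loop with repeated
-- insert at position 0.

-- ===== PORT A =====
def negafib_fib (num : Int) : List Int :=
  -- list = []; a, b = 1, 1; for i in range(num-1): list.append(a); a, b = b, a+b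
  let s1 : List Int × Int × Int :=
    (PySem.List.pyRange 0 (num - 1) 1).foldl
      (fun st _ => (st.1 ++ [st.2.1], st.2.2, st.2.1 + st.2.2)) ([], 1, 1)
  -- a, b = 0, 1; for i in range(num): list.insert(0, a); a, b = b, a-b
  let s2 : List Int × Int × Int :=
    (PySem.List.pyRange 0 num 1).foldl
      (fun st _ => (st.2.1 :: st.1, st.2.2, st.2.1 - st.2.2)) (s1.1, 0, 1)
  s2.1

-- ===== PORT B =====
def negafib_fib_alt (num : Int) : List Int :=
  -- fib = []; a, b = 0, 1; for _ in range(num): fib.append(a); a, b = b, a+b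
  let fib : List Int :=
    ((PySem.List.pyRange 0 num 1).foldl
      (fun (st : List Int × Int × Int) _ => (st.1 ++ [st.2.1], st.2.2, st.2.1 + st.2.2))
      ([], 0, 1)).1
  -- neg = [f if k % 2 == 1 else -f for k, f in enumerate(fib)]
  let neg : List Int :=
    (PySem.List.enumerate fib).map (fun kf => if kf.1 % 2 == 1 then kf.2 else -kf.2)
  -- neg.reverse(); return neg + fib[1:]
  neg.reverse ++ PySem.List.slice fib (some 1) none

-- ===== PRECONDITION & SPEC =====
def Spec_negafib_fib (num : Int) (out : List Int) : Prop := out = negafib_fib_alt num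
instance (num : Int) (out : List Int) : Decidable (Spec_negafib_fib num out) := by unfold Spec_negafib_fib; infer_instance

-- ===== CLAIM (what is proved, stated in full; the proofs are below) =====
def Claim_equal_negafib_fib : Prop := ∀ (num : Int), Dom_negafib_fib num → Spec_negafib_fib num (negafib_fib num)

-- ===== LEMMAS AND PROOFS =====

-- the forward (a, b = b, a+b) sequence, started at (a, b)
def pvGen (a b : Int) : Nat → Int
  | 0 => a
  | n + 1 => pvGen b (a + b) n

-- the backward (a, b = b, a-b) sequence, started at (a, b)
def pvNGen (a b : Int) : Nat → Int
  | 0 => a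
  | n + 1 => pvNGen b (a - b) n

theorem pvGen_neg : ∀ (n : Nat) (a b : Int), pvGen (-a) (-b) n = -pvGen a b n := by
  intro n
  induction n with
  | zero => intro a b; simp [pvGen]
  | succ n ih =>
    intro a b
    show pvGen (-b) (-a + -b) n = -pvGen b (a + b) n
    rw [show (-a + -b) = -(a + b) by ring, ih]

theorem pvNGen_eq : ∀ (n : Nat) (a b : Int),
    pvNGen a b n = if n % 2 = 0 then pvGen a (-b) n else -pvGen a (-b) n := by
  intro n
  induction n with
  | zero => intro a b; simp [pvNGen, pvGen]
  | succ n ih =>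
    intro a b
    show pvNGen b (a - b) n = _
    rw [ih b (a - b)]
    have h1 : pvGen b (-(a - b)) n = -pvGen (-b) (a - b) n := by
      rw [show pvGen (-b) (a - b) n = pvGen (-b) (-(-(a-b))) n by ring_nf, pvGen_neg]; ring
    have h2 : pvGen a (-b) (n + 1) = pvGen (-b) (a - b) n := by
      show pvGen (-b) (a + -b) n = _
      rw [show a + -b = a - b by ring]
    rw [h1, h2]
    rcases Nat.even_or_odd n with he | ho
    · have : n % 2 = 0 := Nat.even_iff.mp he
      have : (n + 1) % 2 = 1 := by omega
      simp [*]
    · have : n % 2 = 1 := Nat.odd_iff.mp ho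
      have : (n + 1) % 2 = 0 := by omega
      simp [*]

-- the append-loop of both A's first loop and B's fib loop
theorem pvFoldA : ∀ (l : List Int) (acc : List Int) (a b : Int),
    l.foldl (fun (st : List Int × Int × Int) _ => (st.1 ++ [st.2.1], st.2.2, st.2.1 + st.2.2)) (acc, a, b)
      = (acc ++ (List.range l.length).map (pvGen a b), pvGen a b l.length, pvGen b (a + b) l.length) := by
  intro l
  induction l with
  | nil => intro acc a b; simp [pvGen]
  | cons x l ih =>
    intro acc a b
    show List.foldl _ (acc ++ [a], b, a + b) l = _
    rw [ih]
    refine Prod.ext ?_ rfl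
    show acc ++ [a] ++ (List.range l.length).map (pvGen b (a + b)) = acc ++ (List.range (l.length + 1)).map (pvGen a b)
    have hmap : (List.range (l.length + 1)).map (pvGen a b)
        = a :: (List.range l.length).map (pvGen b (a + b)) := by
      rw [List.range_succ_eq_map, List.map_cons, List.map_map]; rfl
    rw [hmap]; simp

-- A's second loop: prepend each backward-sequence value
theorem pvFoldB : ∀ (l : List Int) (acc : List Int) (a b : Int),
    l.foldl (fun (st : List Int × Int × Int) _ => (st.2.1 :: st.1, st.2.2, st.2.1 - st.2.2)) (acc, a, b)
      = (((List.range l.length).map (pvNGen a b)).reverse ++ acc, pvNGen a b l.length, pvNGen b (a - b) l.length) := by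
  intro l
  induction l with
  | nil => intro acc a b; simp [pvNGen]
  | cons x l ih =>
    intro acc a b
    show List.foldl _ (a :: acc, b, a - b) l = _
    rw [ih]
    refine Prod.ext ?_ rfl
    show ((List.range l.length).map (pvNGen b (a - b))).reverse ++ a :: acc
        = ((List.range (l.length + 1)).map (pvNGen a b)).reverse ++ acc
    have hmap : (List.range (l.length + 1)).map (pvNGen a b)
        = a :: (List.range l.length).map (pvNGen b (a - b)) := by
      rw [List.range_succ_eq_map, List.map_cons, List.map_map]; rfl
    rw [hmap, List.reverse_cons]; simp

theorem pvEnumerate_map_range : ∀ (n : Nat) (s : Int) (F : Nat → Int),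
    PySem.List.enumerate ((List.range n).map F) s
      = (List.range n).map (fun k : Nat => ((s + (k : Int)), F k)) := by
  intro n
  induction n with
  | zero => intro s F; simp [PySem.List.enumerate_nil]
  | succ n ih =>
    intro s F
    rw [List.range_succ_eq_map, List.map_cons, List.map_map,
        PySem.List.enumerate_cons, ih (s + 1) (F ∘ Nat.succ), List.map_cons, List.map_map]
    refine congrArg₂ _ (by simp) ?_
    refine List.map_congr_left ?_
    intro k _
    simp [Function.comp]
    ring

-- sign identity: the backward sequence from (0, 1) is the sign-flipped forward one
theorem pvNGen_zero_one (k : Nat) :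
    pvNGen 0 1 k = if k % 2 = 1 then pvGen 0 1 k else -pvGen 0 1 k := by
  rw [pvNGen_eq]
  have h : pvGen 0 (-1) k = -pvGen 0 1 k := by
    rw [show pvGen 0 (-1) k = pvGen (-0) (-1) k by norm_num, pvGen_neg]
  rw [h]
  rcases Nat.even_or_odd k with he | ho
  · have : k % 2 = 0 := Nat.even_iff.mp he
    simp [this]
  · have : k % 2 = 1 := Nat.odd_iff.mp ho
    simp [this]

-- tail of the forward table restarts the recurrence at (1, 1)
theorem pvTail_map_range (n : Nat) :
    ((List.range n).map (pvGen 0 1)).tail = (List.range (n - 1)).map (pvGen 1 1) := by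
  cases n with
  | zero => simp
  | succ m =>
    rw [List.range_succ_eq_map, List.map_cons, List.tail_cons, List.map_map]
    refine List.map_congr_left ?_
    intro k _
    show pvGen 1 (0 + 1) k = pvGen 1 1 k
    norm_num

-- ===== VERDICT (by name: the statement is the Claim_ definition above) =====
theorem negafib_fib_spec : Claim_equal_negafib_fib := by
  intro num _
  show negafib_fib num = negafib_fib_alt num
  simp only [negafib_fib, negafib_fib_alt]
  rw [pvFoldA, pvFoldB, pvFoldA]
  simp only [List.nil_append, PySem.List.slice_from_one]
  rw [pvEnumerate_map_range, List.map_map, pvTail_map_range]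
  rw [PySem.List.length_pyRange_one, PySem.List.length_pyRange_one]
  have hn : (num - 1 - 0).toNat = (num - 0).toNat - 1 := by omega
  rw [hn]
  refine congrArg₂ (· ++ ·) (congrArg List.reverse (List.map_congr_left ?_)) rfl
  intro k _
  rcases Nat.mod_two_eq_zero_or_one k with hk | hk
  · simp [pvNGen_zero_one, hk, Function.comp]
    intro h; exact absurd h (by omega)
  · simp [pvNGen_zero_one, hk, Function.comp]
    intro h; exact absurd h (by omega)
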